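-- pv_equiv track=rewrite | github.com/WonilLee211/algorithm-study | 220722/swea_1979_Wonil.py | cnt_space
-- ===== SOURCE A (Python) =====
-- def cnt_space(matrix, k):
--     # ['10101', ...] 형태를 [['1', '1', '1'], ...] 형태로 바꾼다.
--     temp_puzzle = list(list(row.split('0')) for row in matrix)
--
--     needed_space = '1'*k
--     cnt = 0
--
--     for row in temp_puzzle:
--         for space in row:
--             if space == needed_space:
--                 cnt += 1
--
--     return cnt
-- ===== SOURCE B (Python) =====
-- def cnt_space(matrix, k):
--     # One pass per row: track the length of the current '0'-delimited segment
--     # and whether it consists only of '1's; test it at each '0' and at row end.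
--     cnt = 0
--     for row in matrix:
--         run = 0
--         ok = True
--         for c in row:
--             if c == '0':
--                 if ok and run == k:
--                     cnt += 1
--                 run = 0
--                 ok = True
--             else:
--                 run += 1
--                 ok = ok and c == '1'
--         if ok and run == k:
--             cnt += 1
--     return cnt
-- ===== Notes on version B (the rewrite author's own statement) =====
-- stated objective: idiomatic
-- what changed: Replaces building a list of '0'-split segments per row and comparing each to the string '1'*k with a single character scan per row tracking the running segment length and an all-ones flag; Pre_ restricts to the natural domain of nonnegative run lengths k, since for k < 0 the pattern '1'*k collapses to the empty string and A counts empty split segments, which a direct length comparison does not.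
-- outside the precondition, e.g. on cnt_space(['0'], -1): A returns 2, B returns 0
import Mathlib
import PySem

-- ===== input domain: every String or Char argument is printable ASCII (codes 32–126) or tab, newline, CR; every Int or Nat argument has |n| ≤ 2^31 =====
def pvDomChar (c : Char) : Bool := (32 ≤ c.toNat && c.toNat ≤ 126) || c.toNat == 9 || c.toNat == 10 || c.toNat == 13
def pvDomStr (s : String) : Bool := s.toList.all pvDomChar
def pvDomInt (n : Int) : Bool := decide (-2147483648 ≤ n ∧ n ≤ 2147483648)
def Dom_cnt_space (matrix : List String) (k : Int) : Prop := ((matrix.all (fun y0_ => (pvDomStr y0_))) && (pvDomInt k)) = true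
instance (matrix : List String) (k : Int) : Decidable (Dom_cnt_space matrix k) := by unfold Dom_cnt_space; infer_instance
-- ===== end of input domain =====

-- B replaces A's per-row '0'-split + compare-to-'1'*k with a single character scan per row (idiomatic run-length scan); proved equal for k ≥ 0.

-- ===== PORT A =====
-- row.split('0') → PySem.Chars.splitOn on the code points ('0' ≠ "" so Python never raises); '1'*k → List.replicate k.toNat '1'
def cnt_space (matrix : List String) (k : Int) : Int :=
  let temp_puzzle := matrix.map (fun row => PySem.Chars.splitOn row.toList ['0'])
  let needed_space := List.replicate k.toNat '1'
  let cnt : Int := 0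
  temp_puzzle.foldl (fun cnt row =>
    row.foldl (fun cnt space => if space = needed_space then cnt + 1 else cnt) cnt) cnt

-- ===== PORT B =====
-- the body of B's inner loop (one character step) and the end-of-row check
def pvStep (k : Int) (st : Int × Int × Bool) (c : Char) : Int × Int × Bool :=
  if c = '0' then
    (if st.2.2 = true ∧ st.2.1 = k then st.1 + 1 else st.1, 0, true)
  else
    (st.1, st.2.1 + 1, st.2.2 && decide (c = '1'))

def pvFinish (k : Int) (st : Int × Int × Bool) : Int :=
  if st.2.2 = true ∧ st.2.1 = k then st.1 + 1 else st.1

def cnt_space_alt (matrix : List String) (k : Int) : Int :=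
  matrix.foldl (fun cnt row =>
    pvFinish k (row.toList.foldl (pvStep k) (cnt, 0, true))) 0

-- ===== PRECONDITION & SPEC =====
-- Pre_ restricts to the natural domain of nonnegative run lengths k: for k < 0 A's pattern
-- '1'*k is the empty string, so A counts empty '0'-split segments, an artefact of string
-- repetition that no caller asking for runs of negative length would specify; B returns 0 there.
def Pre_cnt_space (matrix : List String) (k : Int) : Prop := 0 ≤ k
instance (matrix : List String) (k : Int) : Decidable (Pre_cnt_space matrix k) := by unfold Pre_cnt_space; infer_instance
def pvWitness_cnt_space : List String × Int := (["10110", "111"], 2)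

def Spec_cnt_space (matrix : List String) (k : Int) (out : Int) : Prop := out = cnt_space_alt matrix k
instance (matrix : List String) (k : Int) (out : Int) : Decidable (Spec_cnt_space matrix k out) := by unfold Spec_cnt_space; infer_instance

-- ===== CLAIM (what is proved, stated in full; the proofs are below) =====
def Claim_equal_cnt_space : Prop := ∀ (matrix : List String) (k : Int), Dom_cnt_space matrix k → Pre_cnt_space matrix k → Spec_cnt_space matrix k (cnt_space matrix k)

-- ===== LEMMAS AND PROOFS =====

-- reference splitter: Python's s.split('0') on code points, structurally recursive
def splitSeg : List Char → List (List Char)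
  | [] => [[]]
  | c :: cs =>
    if c = '0' then [] :: splitSeg cs
    else
      match splitSeg cs with
      | [] => [[c]]
      | s :: ss => (c :: s) :: ss

theorem splitSeg_ne_nil (cs : List Char) : splitSeg cs ≠ [] := by
  cases cs with
  | nil => simp [splitSeg]
  | cons c cs =>
    simp only [splitSeg]
    split
    · simp
    · split <;> simp

theorem modifyHead_id (l : List (List Char)) :
    l.modifyHead (fun s => s) = l := by
  cases l <;> simp

theorem go_eq (fuel : Nat) (l cur : List Char) (acc : List (List Char))
    (h : l.length ≤ fuel) :
    PySem.Chars.splitOn.go ['0'] fuel l cur acc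
      = acc.reverse ++ (splitSeg l).modifyHead (fun s => cur.reverse ++ s) := by
  induction l generalizing fuel cur acc with
  | nil =>
    cases fuel <;> simp [PySem.Chars.splitOn.go, splitSeg]
  | cons c rest ih =>
    cases fuel with
    | zero => simp at h
    | succ n =>
      simp only [List.length_cons, Nat.add_le_add_iff_right] at h
      by_cases hc : c = '0'
      · subst hc
        simp only [PySem.Chars.splitOn.go, List.isPrefixOf, beq_self_eq_true,
          Bool.true_and, if_pos, List.length_singleton, List.drop_succ_cons,
          List.drop_zero, splitSeg]
        rw [ih n [] (cur.reverse :: acc) h]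
        simp [modifyHead_id]
      · have hpre : List.isPrefixOf ['0'] (c :: rest) = false := by
          simp [List.isPrefixOf]; exact fun h' => (hc h'.symm).elim
        simp only [PySem.Chars.splitOn.go, hpre, Bool.false_eq_true, if_false]
        rw [ih n (c :: cur) acc h]
        simp only [splitSeg, if_neg hc]
        obtain ⟨s, ss, hss⟩ : ∃ s ss, splitSeg rest = s :: ss := by
          cases hr : splitSeg rest with
          | nil => exact absurd hr (splitSeg_ne_nil rest)
          | cons s ss => exact ⟨s, ss, rfl⟩
        rw [hss]
        simp

theorem splitOn_eq (cs : List Char) :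
    PySem.Chars.splitOn cs ['0'] = splitSeg cs := by
  unfold PySem.Chars.splitOn
  rw [go_eq (cs.length + 1) cs [] [] (by omega)]
  simp [modifyHead_id]

-- segment test: seg = '1'*k  ↔  seg is all '1's and has length k (as the scanner checks), for k ≥ 0
theorem seg_eq_needed (k : Int) (hk : 0 ≤ k) (seg : List Char) :
    (seg = List.replicate k.toNat '1')
      ↔ (seg.all (fun c => decide (c = '1')) = true ∧ (seg.length : Int) = k) := by
  have h : (((seg.length : Int) = k) ↔ (seg.length = k.toNat)) := by omega
  rw [h, List.eq_replicate_iff]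
  simp [List.all_eq_true, and_comm]

theorem pvStep_zero (k : Int) (st : Int × Int × Bool) :
    pvStep k st '0' = (if st.2.2 = true ∧ st.2.1 = k then st.1 + 1 else st.1, 0, true) := by
  simp [pvStep]

theorem pvStep_ne (k : Int) (st : Int × Int × Bool) (c : Char) (hc : ¬ c = '0') :
    pvStep k st c = (st.1, st.2.1 + 1, st.2.2 && decide (c = '1')) := by
  simp [pvStep, hc]

-- main row invariant: the scanner over cs, started with a partial segment seg already read,
-- equals A's count over the split pieces with seg prepended to the first piece
theorem row_inv (k : Int) (hk : 0 ≤ k) (cs : List Char) :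
    ∀ (cnt run : Int) (ok : Bool) (seg : List Char),
    run = (seg.length : Int) → ok = seg.all (fun c => decide (c = '1')) →
    pvFinish k (cs.foldl (pvStep k) (cnt, run, ok))
      = ((splitSeg cs).modifyHead (fun s => seg ++ s)).foldl
          (fun cnt space => if space = List.replicate k.toNat '1' then cnt + 1 else cnt) cnt := by
  induction cs with
  | nil =>
    intro cnt run ok seg hrun hok
    subst hrun; subst hok
    simp only [List.foldl_nil, splitSeg, List.modifyHead, List.append_nil, List.foldl_cons,
      List.foldl_nil, pvFinish]
    rw [if_congr (seg_eq_needed k hk seg).symm rfl rfl]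
  | cons c rest ih =>
    intro cnt run ok seg hrun hok
    by_cases hc : c = '0'
    · subst hc; subst hrun; subst hok
      simp only [List.foldl_cons, pvStep_zero]
      rw [if_congr (seg_eq_needed k hk seg).symm rfl rfl]
      rw [ih _ 0 true [] (by simp) (by simp)]
      obtain ⟨s, ss, hss⟩ : ∃ s ss, splitSeg rest = s :: ss := by
        cases hr : splitSeg rest with
        | nil => exact absurd hr (splitSeg_ne_nil rest)
        | cons s ss => exact ⟨s, ss, rfl⟩
      simp [splitSeg, hss]
    · simp only [List.foldl_cons, pvStep_ne _ _ _ hc]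
      rw [ih _ (run + 1) (ok && decide (c = '1')) (seg ++ [c])
        (by subst hrun; simp)
        (by subst hok; simp [List.all_append])]
      simp only [splitSeg, if_neg hc]
      obtain ⟨s, ss, hss⟩ : ∃ s ss, splitSeg rest = s :: ss := by
        cases hr : splitSeg rest with
        | nil => exact absurd hr (splitSeg_ne_nil rest)
        | cons s ss => exact ⟨s, ss, rfl⟩
      rw [hss]
      simp

theorem row_eq (k : Int) (hk : 0 ≤ k) (cs : List Char) (cnt : Int) :
    pvFinish k (cs.foldl (pvStep k) (cnt, 0, true))
      = (PySem.Chars.splitOn cs ['0']).foldl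
          (fun cnt space => if space = List.replicate k.toNat '1' then cnt + 1 else cnt) cnt := by
  rw [splitOn_eq]
  have := row_inv k hk cs cnt 0 true [] (by simp) (by simp)
  simpa [modifyHead_id] using this

-- ===== VERDICT (by name: the statement is the Claim_ definition above) =====
theorem cnt_space_spec : Claim_equal_cnt_space := by
  intro matrix k _ hk
  unfold Spec_cnt_space cnt_space cnt_space_alt
  simp only [List.foldl_map, row_eq k hk]
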